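-- pv_equiv track=rewrite | github.com/yxl74/aagv3 | src/apk_analyzer/analyzers/package_inventory.py | _dominant_package_prefix
-- ===== SOURCE A (Python) =====
-- from typing import Any, Dict, Iterable, List, Optional, Set
--
-- def outer_class_name(class_name: str) -> str:
--     if not class_name:
--         return ""
--     return class_name.split("$", 1)[0]
--
-- def package_name_from_class(class_name: str) -> str:
--     cls = outer_class_name(class_name)
--     if "." not in cls:
--         return ""
--     return cls.rsplit(".", 1)[0]
--
-- def _dominant_package_prefix(class_names: Iterable[str]) -> List[str]:
--     """
--     Return the most common package prefix(es) among the given fully-qualified class names.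
--
--     Output prefixes are normalized with a trailing dot, e.g. "com.example.app.".
--     """
--     counts: Dict[str, int] = {}
--     for class_name in class_names:
--         pkg = package_name_from_class(class_name)
--         if not pkg:
--             continue
--         prefix = f"{pkg}."
--         counts[prefix] = counts.get(prefix, 0) + 1
--     if not counts:
--         return []
--     max_count = max(counts.values())
--     return sorted([prefix for prefix, count in counts.items() if count == max_count])
-- ===== SOURCE B (Python) =====
-- from typing import Iterable, List
--
-- def outer_class_name(class_name: str) -> str:
--     if not class_name:
--         return ""
--     return class_name.split("$", 1)[0]
--
-- def package_name_from_class(class_name: str) -> str: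
--     cls = outer_class_name(class_name)
--     if "." not in cls:
--         return ""
--     return cls.rsplit(".", 1)[0]
--
-- def _group_runs(prefixes: List[str]) -> List[tuple]:
--     """Group a sorted list into (value, run_length) pairs, front to back."""
--     if not prefixes:
--         return []
--     head = prefixes[0]
--     i = 1
--     while i < len(prefixes) and prefixes[i] == head:
--         i += 1
--     return [(head, i)] + _group_runs(prefixes[i:])
--
-- def _dominant_package_prefix(class_names: Iterable[str]) -> List[str]:
--     """Sort the normalized prefixes, group adjacent runs, keep the longest runs."""
--     prefixes = sorted(
--         package_name_from_class(c) + "."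
--         for c in class_names
--         if package_name_from_class(c)
--     )
--     groups = _group_runs(prefixes)
--     if not groups:
--         return []
--     best = max(c for _, c in groups)
--     return [p for p, c in groups if c == best]
-- ===== Notes on version B (the rewrite author's own statement) =====
-- stated objective: alternative
-- what changed: B replaces A's hash-table counting (dict of prefix counts, max over values, filter, then sort) by sort-then-scan: it sorts the normalized prefixes, groups adjacent equal runs into (prefix, run-length) pairs, and keeps the prefixes of maximal run length, already in sorted order.
import Mathlib
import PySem

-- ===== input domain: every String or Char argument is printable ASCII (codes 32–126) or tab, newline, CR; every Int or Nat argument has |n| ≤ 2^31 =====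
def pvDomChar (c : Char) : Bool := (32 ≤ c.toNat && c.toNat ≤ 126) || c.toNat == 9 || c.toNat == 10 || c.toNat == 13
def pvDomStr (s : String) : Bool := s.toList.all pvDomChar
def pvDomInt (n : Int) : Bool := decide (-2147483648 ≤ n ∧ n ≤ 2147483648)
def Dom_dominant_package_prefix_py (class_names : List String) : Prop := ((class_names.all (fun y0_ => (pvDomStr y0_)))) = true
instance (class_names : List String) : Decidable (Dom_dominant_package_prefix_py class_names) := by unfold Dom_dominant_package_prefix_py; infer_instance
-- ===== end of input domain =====

-- B replaces A's hash-table counting by sort-then-group-adjacent-runs (objective: alternative, same result).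

-- ===== PORT A =====
-- shared module helpers (used verbatim by both Python versions)

-- outer_class_name: class_name.split("$", 1)[0]; "$" ≠ "" so splitMax? is some and never returns [],
-- the wildcard branch is unreachable
def outer_class_name_py (class_name : String) : String :=
  if class_name = "" then ""
  else
    match PySem.Str.splitMax? class_name "$" 1 with
    | some (p :: _) => p
    | _ => ""

-- package_name_from_class: cls.rsplit(".", 1)[0].  Guarded by '"." in cls', rsplit(".", 1)[0] is
-- exactly the text before the LAST "." , i.e. the first rfind(cls, ".") characters (exact: rfind ≥ 0 here).
def package_name_from_class_py (class_name : String) : String :=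
  let cls := outer_class_name_py class_name
  if PySem.Str.isIn "." cls = false then ""
  else String.ofList (cls.toList.take (PySem.Str.rfind cls ".").toNat)

def dominant_package_prefix_py (class_names : List String) : List String :=
  let counts : PySem.Dict String Int := class_names.foldl (fun d class_name =>
    let pkg := package_name_from_class_py class_name
    if pkg = "" then d
    else d.insert (pkg ++ ".") (d.getD (pkg ++ ".") 0 + 1)) PySem.Dict.empty
  if counts.items.isEmpty then []
  else
    -- max(counts.values()) : values is nonempty here, so max? is some and the default is unreachable
    let max_count := (PySem.List.max? counts.values (fun v => v)).getD 0
    PySem.List.sorted ((counts.items.filter (fun kv => kv.2 == max_count)).map (fun kv => kv.1))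
      (fun x => x) false

-- ===== PORT B =====
-- _group_runs: group a sorted list into (value, run length) pairs, front to back
def groupRuns_py : List String → List (String × Nat)
  | [] => []
  | x :: t =>
    (x, 1 + (t.takeWhile (fun y => y == x)).length) :: groupRuns_py (t.dropWhile (fun y => y == x))
termination_by l => l.length
decreasing_by
  simp only [List.length_cons]
  exact Nat.lt_succ_of_le (List.length_dropWhile_le _ _)

def dominant_package_prefix_py_alt (class_names : List String) : List String :=
  let prefixes := PySem.List.sorted
    (class_names.filterMap (fun c =>
      if package_name_from_class_py c = "" then none
      else some (package_name_from_class_py c ++ "."))) (fun x => x) false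
  let groups := groupRuns_py prefixes
  if groups.isEmpty then []
  else
    -- max(c for _, c in groups) : groups is nonempty here, so max? is some and the default is unreachable
    let best := (PySem.List.max? (groups.map (fun g => g.2)) (fun v => v)).getD 0
    (groups.filter (fun g => g.2 == best)).map (fun g => g.1)

-- ===== PRECONDITION & SPEC =====
def Spec_dominant_package_prefix_py (class_names : List String) (out : List String) : Prop := out = dominant_package_prefix_py_alt class_names
instance (class_names : List String) (out : List String) : Decidable (Spec_dominant_package_prefix_py class_names out) := by unfold Spec_dominant_package_prefix_py; infer_instance

-- ===== CLAIM (what is proved, stated in full; the proofs are below) =====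
def Claim_equal_dominant_package_prefix_py : Prop := ∀ (class_names : List String), Dom_dominant_package_prefix_py class_names → Spec_dominant_package_prefix_py class_names (dominant_package_prefix_py class_names)

-- ===== LEMMAS AND PROOFS =====

-- the list of normalized non-empty prefixes, in input order
def pvPfx (class_names : List String) : List String :=
  class_names.filterMap (fun c =>
    if package_name_from_class_py c = "" then none
    else some (package_name_from_class_py c ++ "."))

-- A's dict-building loop is the counting fold over pvPfx
theorem pvFoldA (class_names : List String) (d : PySem.Dict String Int) :
    class_names.foldl (fun d class_name =>
      let pkg := package_name_from_class_py class_name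
      if pkg = "" then d
      else d.insert (pkg ++ ".") (d.getD (pkg ++ ".") 0 + 1)) d
    = (pvPfx class_names).foldl (fun d x => d.insert x (d.getD x 0 + 1)) d := by
  induction class_names generalizing d with
  | nil => rfl
  | cons c t ih =>
    simp only [List.foldl_cons, pvPfx, List.filterMap_cons]
    by_cases hc : package_name_from_class_py c = "" <;> simp [hc, ih, pvPfx]


-- the grouped runs of a ≤-sorted list: strictly increasing firsts, same members, snd = count
theorem dropWhile_beq_lt (x : String) (t : List String)
    (hx : ∀ z ∈ t, x ≤ z) (ht : t.Pairwise (· ≤ ·)) :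
    ∀ z ∈ t.dropWhile (fun y => y == x), x < z := by
  induction t with
  | nil => simp
  | cons y t' ih =>
    rw [List.pairwise_cons] at ht
    by_cases hy : (y == x) = true
    · rw [List.dropWhile_cons, if_pos hy]
      exact ih (fun z hz => hx z (List.mem_cons_of_mem _ hz)) ht.2
    · rw [List.dropWhile_cons, if_neg hy]
      have hxy : x < y :=
        lt_of_le_of_ne (hx y List.mem_cons_self) (fun he => hy (by rw [he]; exact beq_self_eq_true y))
      intro z hz
      rcases List.mem_cons.mp hz with rfl | hz'
      · exact hxy
      · exact lt_of_lt_of_le hxy (ht.1 z hz')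


theorem groupRuns_spec (ys : List String) (h : ys.Pairwise (· ≤ ·)) :
    ((groupRuns_py ys).map Prod.fst).Pairwise (· < ·) ∧
    (∀ p, p ∈ (groupRuns_py ys).map Prod.fst ↔ p ∈ ys) ∧
    (∀ g ∈ groupRuns_py ys, g.2 = ys.count g.1) := by
  induction ys using groupRuns_py.induct with
  | case1 => simp [groupRuns_py]
  | case2 x t ih =>
    rw [List.pairwise_cons] at h
    obtain ⟨hx, ht⟩ := h
    set tw := t.takeWhile (fun y => y == x) with htw
    set dw := t.dropWhile (fun y => y == x) with hdw
    have hsplit : tw ++ dw = t := List.takeWhile_append_dropWhile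
    have hdwpw : dw.Pairwise (· ≤ ·) := ht.sublist (List.dropWhile_sublist _)
    have htw_eq : ∀ z ∈ tw, z = x := by
      rw [htw]
      intro z hz
      exact eq_of_beq (List.mem_takeWhile_imp (p := fun y => y == x) hz)
    have hlt : ∀ z ∈ dw, x < z := by
      rw [hdw]
      exact dropWhile_beq_lt x t hx ht
    obtain ⟨ih1, ih2, ih3⟩ := ih hdwpw
    rw [groupRuns_py]
    refine ⟨?_, ?_, ?_⟩
    · rw [List.map_cons, List.pairwise_cons]
      refine ⟨?_, ih1⟩
      intro q hq
      exact hlt q ((ih2 q).mp hq)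
    · intro p
      rw [List.map_cons, List.mem_cons, ih2, List.mem_cons, ← hsplit, List.mem_append]
      constructor
      · rintro (rfl | hp)
        · exact Or.inl rfl
        · exact Or.inr (Or.inr hp)
      · rintro (rfl | hp | hp)
        · exact Or.inl rfl
        · exact Or.inl (htw_eq p hp)
        · exact Or.inr hp
    · intro g hg
      rcases List.mem_cons.mp hg with rfl | hg'
      · show 1 + tw.length = List.count x (x :: t)
        rw [List.count_cons_self, ← hsplit, List.count_append]
        have h1 : List.count x tw = tw.length := List.count_eq_length.mpr (fun b hb => (htw_eq b hb).symm)
        have h2 : List.count x dw = 0 := List.count_eq_zero.mpr (fun hmem => lt_irrefl x (hlt x hmem))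
        omega
      · have hfst : g.1 ∈ dw := (ih2 g.1).mp (List.mem_map_of_mem hg')
        have hne : g.1 ≠ x := fun he => lt_irrefl x (he ▸ hlt g.1 hfst)
        rw [ih3 g hg']
        rw [← hsplit, List.count_cons_of_ne (Ne.symm hne) , List.count_append]
        have : List.count g.1 tw = 0 := List.count_eq_zero.mpr (fun hmem => hne (htw_eq _ hmem))
        omega

-- max? with identity key returns exactly the greatest element value
theorem max?_id_eq {α : Type} [LinearOrder α] (l : List α) (v : α)
    (hv : v ∈ l) (hmax : ∀ y ∈ l, y ≤ v) :
    PySem.List.max? l (fun x => x) = some v := by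
  cases hm : PySem.List.max? l (fun x => x) with
  | none => exact absurd ((PySem.List.max?_eq_none_iff l _).mp hm ▸ hv) (List.not_mem_nil)
  | some w =>
    have hw := PySem.List.max?_mem hm
    have := PySem.List.max?_isMax hm
    exact congrArg some (le_antisymm (hmax w hw) (this v hv))

theorem pvValues {κ ν : Type} (d : PySem.Dict κ ν) :
    d.values = d.items.map (fun kv => kv.2) := by
  cases d
  simp [PySem.Dict.values_mk]

theorem pvMain (class_names : List String) :
    dominant_package_prefix_py class_names = dominant_package_prefix_py_alt class_names := by
  have hinline : class_names.filterMap (fun c =>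
      if package_name_from_class_py c = "" then none
      else some (package_name_from_class_py c ++ ".")) = pvPfx class_names := rfl
  unfold dominant_package_prefix_py dominant_package_prefix_py_alt
  rw [pvFoldA, PySem.Dict.foldl_insert_getD_add_one_eq_counter, hinline]
  set P := pvPfx class_names with hPdef
  by_cases hP0 : P = []
  · rw [hP0]
    have hs : PySem.List.sorted ([] : List String) (fun x => x) false = [] :=
      (PySem.List.sorted_eq_nil_iff _ _ _).mpr rfl
    simp [hs, PySem.Dict.items_counter, groupRuns_py, PySem.Set.ofList]
  · -- non-empty case
    have hSpw : (PySem.List.sorted P (fun x => x) false).Pairwise (· ≤ ·) :=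
      PySem.List.sorted_pairwise P (fun x => x)
    have hSperm : (PySem.List.sorted P (fun x => x) false).Perm P :=
      PySem.List.sorted_perm P (fun x => x) false
    obtain ⟨hGpw, hGmem, hGcnt⟩ := groupRuns_spec (PySem.List.sorted P (fun x => x) false) hSpw
    set S := PySem.List.sorted P (fun x => x) false with hSdef
    set Gs := groupRuns_py S with hGdef
    set K := (PySem.Set.ofList P : List String) with hKdef
    have hSne : S ≠ [] := by
      rw [hSdef, Ne, PySem.List.sorted_eq_nil_iff]; exact hP0
    have hGne : Gs ≠ [] := by
      rw [hGdef]
      cases hS : S with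
      | nil => exact absurd hS hSne
      | cons a t => rw [groupRuns_py]; simp
    have hKne : K ≠ [] := by
      obtain ⟨x, hx⟩ := List.exists_mem_of_ne_nil P hP0
      have : x ∈ K := by rw [hKdef]; exact (PySem.Set.mem_ofList P x).mpr hx
      exact List.ne_nil_of_mem this
    have hFnodup : (Gs.map Prod.fst).Nodup := hGpw.imp (fun h => ne_of_lt h)
    have hFK : (Gs.map Prod.fst).Perm K :=
      (List.perm_ext_iff_of_nodup hFnodup (PySem.Set.nodup_ofList P)).mpr (fun a => by
        rw [hGmem a, hSdef, PySem.List.mem_sorted]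
        exact (PySem.Set.mem_ofList P a).symm)
    have hsnd : ∀ gp ∈ Gs, gp.2 = List.count gp.1 P := fun gp hg =>
      (hGcnt gp hg).trans (hSperm.count_eq gp.1)
    -- the snd components of Gs are the counts of the fst components
    have hmapsnd : Gs.map (fun g => g.2) = (Gs.map Prod.fst).map (fun k => List.count k P) := by
      rw [List.map_map]
      exact List.map_congr_left (fun gp hg => hsnd gp hg)
    -- B's best run length
    obtain ⟨b, hbmax⟩ : ∃ b, PySem.List.max? (Gs.map (fun g => g.2)) (fun v => v) = some b := by
      cases hm : PySem.List.max? (Gs.map (fun g => g.2)) (fun v => v) with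
      | none =>
        have := (PySem.List.max?_eq_none_iff _ _).mp hm
        exact absurd (List.map_eq_nil_iff.mp this) hGne
      | some b => exact ⟨b, rfl⟩
    have hbmem : b ∈ Gs.map (fun g => g.2) := PySem.List.max?_mem hbmax
    have hble : ∀ y ∈ Gs.map (fun g => g.2), y ≤ b := PySem.List.max?_isMax hbmax
    have hpermcnt : ((Gs.map Prod.fst).map (fun k => List.count k P)).Perm
        (K.map (fun k => List.count k P)) := hFK.map _
    have hbmemK : b ∈ K.map (fun k => List.count k P) :=
      hpermcnt.mem_iff.mp (hmapsnd ▸ hbmem)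
    have hbleK : ∀ y ∈ K.map (fun k => List.count k P), y ≤ b := fun y hy =>
      hble y (hmapsnd ▸ hpermcnt.mem_iff.mpr hy)
    -- A's max over the dict values is the cast of b
    have hAmax : PySem.List.max? ((PySem.Dict.counter P).values) (fun v => v)
        = some ((b : Int)) := by
      rw [pvValues, PySem.Dict.items_counter, List.map_map]
      apply max?_id_eq
      · obtain ⟨k, hk, hkb⟩ := List.mem_map.mp hbmemK
        exact List.mem_map.mpr ⟨k, hk, by simp [← hkb]⟩
      · intro y hy
        obtain ⟨k, hk, hky⟩ := List.mem_map.mp hy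
        have := hbleK (List.count k P) (List.mem_map_of_mem hk)
        simp only [Function.comp] at hky
        rw [← hky]
        exact_mod_cast this
    -- rewrite both sides
    simp only [PySem.Dict.items_counter, hAmax, Option.getD_some]
    rw [← hGdef, hbmax]
    simp only [Option.getD_some]
    have hKg : (K.map (fun k => (k, (List.count k P : Int)))).isEmpty = false := by
      cases hK : K with
      | nil => exact absurd hK hKne
      | cons a t => simp
    have hGe : Gs.isEmpty = false := by
      cases hG : Gs with
      | nil => exact absurd hG hGne
      | cons a t => simp
    rw [hKg, hGe]
    simp only [Bool.false_eq_true, if_false]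
    -- A's side: filter over the items list is a filter over K
    rw [List.filter_map, List.map_map]
    have hpredA : ((fun kv : String × Int => kv.2 == (b : Int)) ∘
        (fun k => (k, (List.count k P : Int)))) = (fun k => List.count k P == b) := by
      funext k
      simp [Function.comp]
    have hmapfst : ((fun kv : String × Int => kv.1) ∘
        (fun k => (k, (List.count k P : Int)))) = (fun k => k) := rfl
    rw [hpredA, hmapfst, List.map_id']
    -- B's side: filter over the groups is a filter over the fst components
    have hBfilt : Gs.filter (fun g => g.2 == b)
        = Gs.filter (fun g => List.count g.1 P == b) :=
      List.filter_congr (fun gp hg => by rw [hsnd gp hg])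
    rw [hBfilt]
    have hBmap : (Gs.filter (fun g => List.count g.1 P == b)).map (fun g => g.1)
        = (Gs.map Prod.fst).filter (fun k => List.count k P == b) := by
      rw [List.filter_map]
      rfl
    rw [hBmap]
    exact PySem.List.sorted_eq_of_perm_of_pairwise_lt _ _ _
      (hFK.filter _)
      (List.Pairwise.sublist List.filter_sublist hGpw)

-- ===== VERDICT (by name: the statement is the Claim_ definition above) =====
theorem dominant_package_prefix_py_spec : Claim_equal_dominant_package_prefix_py := by
  intro class_names _
  unfold Spec_dominant_package_prefix_py
  exact pvMain class_names
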